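-- pv_equiv track=rewrite | github.com/pannchat/1day1commit | 1003.py | count_fib
-- ===== SOURCE A (Python) =====
-- def count_fib(n):
--     zero_count = [1,0]
--     one_count = [0,1]
--     if n < 2 :
--         return
--
--     for i in range(2,n+1):
--         zero_count.append(zero_count[i-2] + zero_count[i-1])
--         one_count.append(one_count[i-2] + one_count[i-1])
--     return zero_count, one_count
-- ===== SOURCE B (Python) =====
-- def count_fib(n):
--     if n < 2:
--         return
--     one_count = [0, 1]
--     for i in range(2, n + 1):
--         one_count.append(one_count[i - 2] + one_count[i - 1])
--     return [1] + one_count[:n], one_count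
-- ===== Notes on version B (the rewrite author's own statement) =====
-- stated objective: simpler
-- what changed: B maintains only the one_count recurrence list and derives zero_count afterwards as [1] + one_count[:n] (using zero_count[i] = one_count[i-1]), instead of running two parallel Fibonacci recurrences.
import Mathlib
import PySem

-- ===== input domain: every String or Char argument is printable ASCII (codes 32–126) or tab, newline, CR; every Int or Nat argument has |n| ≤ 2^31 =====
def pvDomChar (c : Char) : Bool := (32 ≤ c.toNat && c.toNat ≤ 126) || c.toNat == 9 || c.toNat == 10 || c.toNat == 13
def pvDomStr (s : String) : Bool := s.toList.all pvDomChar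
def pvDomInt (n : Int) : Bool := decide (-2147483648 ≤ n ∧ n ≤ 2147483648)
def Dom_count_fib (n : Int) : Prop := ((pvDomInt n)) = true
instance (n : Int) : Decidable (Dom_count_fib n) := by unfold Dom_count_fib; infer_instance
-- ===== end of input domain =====

-- B keeps only the one_count recurrence and derives zero_count as [1] + one_count[:n];
-- A runs two parallel recurrence lists. Equivalence of the return values is proved below.

-- ===== PORT A =====
-- Literal port of A: two parallel lists, each appending xs[i-2]+xs[i-1] over range(2, n+1).
-- All indices are in range, so pyGetD is exact here.
def count_fib (n : Int) : Option (List Int × List Int) :=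
  let zero_count : List Int := [1, 0]
  let one_count : List Int := [0, 1]
  if n < 2 then none
  else
    let s := (PySem.List.pyRange 2 (n + 1) 1).foldl
      (fun (s : List Int × List Int) i =>
        (s.1 ++ [PySem.List.pyGetD s.1 (i - 2) 0 + PySem.List.pyGetD s.1 (i - 1) 0],
         s.2 ++ [PySem.List.pyGetD s.2 (i - 2) 0 + PySem.List.pyGetD s.2 (i - 1) 0]))
      (zero_count, one_count)
    some s

-- ===== PORT B =====
-- Literal port of Source B: one recurrence list, zero_count derived by a slice.
def count_fib_alt (n : Int) : Option (List Int × List Int) :=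
  if n < 2 then none
  else
    let one_count := (PySem.List.pyRange 2 (n + 1) 1).foldl
      (fun (o : List Int) i =>
        o ++ [PySem.List.pyGetD o (i - 2) 0 + PySem.List.pyGetD o (i - 1) 0])
      [0, 1]
    some (1 :: PySem.List.slice one_count none (some n), one_count)

-- ===== PRECONDITION & SPEC =====
def Spec_count_fib (n : Int) (out : Option (List Int × List Int)) : Prop := out = count_fib_alt n
instance (n : Int) (out : Option (List Int × List Int)) : Decidable (Spec_count_fib n out) := by unfold Spec_count_fib; infer_instance

-- ===== CLAIM (what is proved, stated in full; the proofs are below) =====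
def Claim_equal_count_fib : Prop := ∀ (n : Int), Dom_count_fib n → Spec_count_fib n (count_fib n)

-- ===== LEMMAS AND PROOFS =====

-- Fibonacci values: one_count[j] = pvFib j, zero_count[j] = pvFibZ j.
def pvFib : Nat → Int
  | 0 => 0
  | 1 => 1
  | k + 2 => pvFib k + pvFib (k + 1)

def pvFibZ : Nat → Int
  | 0 => 1
  | k + 1 => pvFib k

-- B's loop state after the indices 2 .. 2+k-1 have been processed.
lemma loopB (k : Nat) :
    (PySem.List.pyRange 2 (2 + (k : Int)) 1).foldl
      (fun (o : List Int) i =>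
        o ++ [PySem.List.pyGetD o (i - 2) 0 + PySem.List.pyGetD o (i - 1) 0])
      [0, 1]
    = (List.range (k + 2)).map pvFib := by
  induction k with
  | zero =>
      rw [show (2 + ((0 : Nat) : Int)) = 2 by norm_num, PySem.List.pyRange_one_eq_nil (by omega)]
      simp [List.range_succ, pvFib]
  | succ k ih =>
      rw [show (2 + ((k + 1 : Nat) : Int)) = (2 + (k : Int)) + 1 by push_cast; ring,
        PySem.List.pyRange_one_succ_right (by omega), List.foldl_append, ih]
      simp only [List.foldl_cons, List.foldl_nil]
      rw [show (2 + (k : Int) - 2) = ((k : Nat) : Int) by ring,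
        show (2 + (k : Int) - 1) = ((k + 1 : Nat) : Int) by push_cast; ring]
      simp only [PySem.List.pyGetD_natCast]
      rw [List.getD_eq_getElem _ _ (by simp), List.getD_eq_getElem _ _ (by simp)]
      simp only [List.getElem_map, List.getElem_range]
      simp [List.range_succ, pvFib]

-- A's paired loop state: zero = map pvFibZ, one = map pvFib.
lemma loopA (k : Nat) :
    (PySem.List.pyRange 2 (2 + (k : Int)) 1).foldl
      (fun (s : List Int × List Int) i =>
        (s.1 ++ [PySem.List.pyGetD s.1 (i - 2) 0 + PySem.List.pyGetD s.1 (i - 1) 0],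
         s.2 ++ [PySem.List.pyGetD s.2 (i - 2) 0 + PySem.List.pyGetD s.2 (i - 1) 0]))
      ([1, 0], [0, 1])
    = ((List.range (k + 2)).map pvFibZ, (List.range (k + 2)).map pvFib) := by
  induction k with
  | zero =>
      rw [show (2 + ((0 : Nat) : Int)) = 2 by norm_num, PySem.List.pyRange_one_eq_nil (by omega)]
      simp [List.range_succ, pvFib, pvFibZ]
  | succ k ih =>
      rw [show (2 + ((k + 1 : Nat) : Int)) = (2 + (k : Int)) + 1 by push_cast; ring,
        PySem.List.pyRange_one_succ_right (by omega), List.foldl_append, ih]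
      simp only [List.foldl_cons, List.foldl_nil]
      rw [show (2 + (k : Int) - 2) = ((k : Nat) : Int) by ring,
        show (2 + (k : Int) - 1) = ((k + 1 : Nat) : Int) by push_cast; ring]
      simp only [PySem.List.pyGetD_natCast]
      rw [List.getD_eq_getElem _ _ (by simp), List.getD_eq_getElem _ _ (by simp),
        List.getD_eq_getElem _ _ (by simp), List.getD_eq_getElem _ _ (by simp)]
      simp only [List.getElem_map, List.getElem_range]
      cases k with
      | zero => simp [List.range_succ, pvFib, pvFibZ]
      | succ j => simp [List.range_succ, pvFib, pvFibZ]

-- zero_count is the one_count list shifted: map pvFibZ over range (m+1) = 1 :: map pvFib over range m.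
lemma fibZ_shift (m : Nat) :
    (List.range (m + 1)).map pvFibZ = 1 :: (List.range m).map pvFib := by
  rw [List.range_succ_eq_map]
  simp [pvFibZ, Function.comp]

theorem count_fib_spec_aux (n : Int) : count_fib n = count_fib_alt n := by
  unfold count_fib count_fib_alt
  by_cases h : n < 2
  · simp [h]
  · simp only [h, if_false]
    obtain ⟨k, rfl⟩ : ∃ k : Nat, n = 2 + (k : Int) := ⟨(n - 2).toNat, by omega⟩
    rw [show (2 + (k : Int) + 1) = 2 + ((k + 1 : Nat) : Int) by push_cast; ring]
    rw [loopA (k + 1), loopB (k + 1)]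
    rw [show ((2 : Int) + (k : Int)) = ((k + 2 : Nat) : Int) by push_cast; ring,
      PySem.List.slice_to_natCast]
    rw [show k + 1 + 2 = (k + 2) + 1 by ring, fibZ_shift (k + 2)]
    rw [← List.map_take, List.take_range, show min (k + 2) (k + 2 + 1) = k + 2 by omega]

-- ===== VERDICT (by name: the statement is the Claim_ definition above) =====
theorem count_fib_spec : Claim_equal_count_fib := by
  intro n _
  unfold Spec_count_fib
  exact count_fib_spec_aux n
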